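-- pv_equiv track=rewrite | github.com/Vitonava/ejerciciosProgra1UADE | matriz2.py | suma_filas_columnas
-- ===== SOURCE A (Python) =====
-- def suma_filas_columnas(matriz):
--     """Devuelve la suma de cada fila y cada columna de la matriz, sin usar sum()."""
--     suma_filas = []
--     suma_columnas = [0] * len(matriz[0])
--
--     for fila in matriz:
--         suma_fila = 0
--         for i in range(len(fila)):
--             suma_fila += fila[i]
--             suma_columnas[i] += fila[i]
--         suma_filas.append(suma_fila)
--
--     return suma_filas, suma_columnas
-- ===== SOURCE B (Python) =====
-- def suma_filas_columnas(matriz):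
--     """Row sums and column sums of a rectangular matrix, each in its own pass."""
--     ncols = len(matriz[0])
--     suma_filas = [sum(fila) for fila in matriz]
--     suma_columnas = [sum(fila[j] for fila in matriz) for j in range(ncols)]
--     return suma_filas, suma_columnas
-- ===== Notes on version B (the rewrite author's own statement) =====
-- stated objective: alternative
-- what changed: A's single fused row-major loop maintaining an in-place column accumulator is replaced by two independent passes (a row-sum comprehension and a column-major column-sum comprehension); Pre_ excludes empty and non-rectangular matrices: A raises IndexError on the empty matrix and on rows longer than the first, and on rows shorter than the first A silently skips the missing entries while B's column indexing raises IndexError.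
-- outside the precondition, e.g. on suma_filas_columnas([[1, 2], [3]]): A returns ([3, 3], [4, 2]), B raises IndexError
import Mathlib
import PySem

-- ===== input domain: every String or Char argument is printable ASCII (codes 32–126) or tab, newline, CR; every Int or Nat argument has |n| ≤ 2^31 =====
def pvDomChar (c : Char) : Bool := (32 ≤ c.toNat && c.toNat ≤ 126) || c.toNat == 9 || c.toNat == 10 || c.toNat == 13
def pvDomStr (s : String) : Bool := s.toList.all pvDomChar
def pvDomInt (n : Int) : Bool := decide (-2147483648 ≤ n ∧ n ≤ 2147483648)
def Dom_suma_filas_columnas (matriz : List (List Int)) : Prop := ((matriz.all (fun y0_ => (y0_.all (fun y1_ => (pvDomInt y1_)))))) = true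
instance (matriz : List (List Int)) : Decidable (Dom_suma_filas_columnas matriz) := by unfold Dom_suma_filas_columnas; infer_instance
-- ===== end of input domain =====

-- B replaces A's fused row-major loop (in-place column accumulator) by two independent
-- passes: a row-sum pass and a column-major column-sum pass; same cost, different decomposition.

-- ===== PORT A =====
-- matriz[0] raises IndexError on an empty matriz, and suma_columnas[i] raises IndexError
-- when a row is longer than the first row: both are excluded by Pre_ below (pyGetD/pySetD
-- are the total forms, exact inside Pre_).
def suma_filas_columnas (matriz : List (List Int)) : List Int × List Int :=
  let suma_columnas0 : List Int := List.replicate (PySem.List.pyGetD matriz 0 []).length 0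
  let r := matriz.foldl
    (fun (acc : List Int × List Int) fila =>
      let inner := (PySem.List.pyRange 0 (fila.length : Int) 1).foldl
        (fun (p : Int × List Int) i =>
          (p.1 + PySem.List.pyGetD fila i 0,
           PySem.List.pySetD p.2 i (PySem.List.pyGetD p.2 i 0 + PySem.List.pyGetD fila i 0)))
        (0, acc.2)
      (acc.1 ++ [inner.1], inner.2))
    ([], suma_columnas0)
  (r.1, r.2)

-- ===== PORT B =====
-- fila[j] raises IndexError on rows shorter than the first row: excluded by Pre_ below
-- (pyGetD is the total form, exact on rectangular matrices).
def suma_filas_columnas_alt (matriz : List (List Int)) : List Int × List Int :=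
  let ncols : Nat := (PySem.List.pyGetD matriz 0 []).length
  let suma_filas := matriz.map (fun fila => fila.foldl (fun a b => a + b) 0)
  let suma_columnas := (PySem.List.pyRange 0 (ncols : Int) 1).map
    (fun j => matriz.foldl (fun acc fila => acc + PySem.List.pyGetD fila j 0) 0)
  (suma_filas, suma_columnas)

-- ===== PRECONDITION & SPEC =====
-- Pre_ admits exactly the nonempty rectangular matrices: A raises IndexError on the empty
-- matrix and on rows longer than the first, and on rows shorter than the first A's
-- accidental skip of missing entries meets an IndexError from B's column indexing.
def Pre_suma_filas_columnas (matriz : List (List Int)) : Prop :=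
  matriz ≠ [] ∧ ∀ fila ∈ matriz, fila.length = (matriz.headD []).length
instance (matriz : List (List Int)) : Decidable (Pre_suma_filas_columnas matriz) := by
  unfold Pre_suma_filas_columnas; infer_instance
def pvWitness_suma_filas_columnas : List (List Int) := [[1, 2], [3, 4]]

def Spec_suma_filas_columnas (matriz : List (List Int)) (out : List Int × List Int) : Prop :=
  out = suma_filas_columnas_alt matriz
instance (matriz : List (List Int)) (out : List Int × List Int) : Decidable (Spec_suma_filas_columnas matriz out) := by
  unfold Spec_suma_filas_columnas; infer_instance

-- ===== CLAIM (what is proved, stated in full; the proofs are below) =====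
def Claim_equal_suma_filas_columnas : Prop := ∀ (matriz : List (List Int)), Dom_suma_filas_columnas matriz → Pre_suma_filas_columnas matriz → Spec_suma_filas_columnas matriz (suma_filas_columnas matriz)

-- ===== LEMMAS AND PROOFS =====

/-- Elementwise addition of `fila` into (a prefix of) `cols`. -/
def addInto : List Int → List Int → List Int
  | cols, [] => cols
  | [], _ => []
  | c :: cs, f :: fs => (c + f) :: addInto cs fs

theorem length_addInto : ∀ (cols fila : List Int), (addInto cols fila).length = cols.length := by
  intro cols fila
  induction fila generalizing cols with
  | nil => cases cols <;> simp [addInto]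
  | cons f fs ih => cases cols <;> simp [addInto, ih]

theorem addInto_snoc : ∀ (xs cols : List Int) (x : Int),
    addInto cols (xs ++ [x])
      = (addInto cols xs).set xs.length ((addInto cols xs).getD xs.length 0 + x) := by
  intro xs
  induction xs with
  | nil => intro cols x; cases cols <;> simp [addInto]
  | cons y ys ih => intro cols x; cases cols <;> simp [addInto, ih]

theorem addInto_getD (j : Nat) : ∀ (cols fila : List Int), j < cols.length →
    (addInto cols fila).getD j 0
      = cols.getD j 0 + (if j < fila.length then fila.getD j 0 else 0) := by
  induction j with
  | zero =>
    intro cols fila h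
    cases cols with
    | nil => simp at h
    | cons c cs => cases fila <;> simp [addInto]
  | succ j ih =>
    intro cols fila h
    cases cols with
    | nil => simp at h
    | cons c cs =>
      cases fila with
      | nil => simp [addInto]
      | cons f fs =>
        simp only [addInto, List.getD_cons_succ, List.length_cons]
        rw [ih cs fs (by simpa using h)]
        simp

/-- A's inner index loop is a sum together with an `addInto`. -/
theorem innerA_eq : ∀ (fila cols : List Int) (s : Int),
    (PySem.List.pyRange 0 (fila.length : Int) 1).foldl
      (fun (p : Int × List Int) i =>
        (p.1 + PySem.List.pyGetD fila i 0,
         PySem.List.pySetD p.2 i (PySem.List.pyGetD p.2 i 0 + PySem.List.pyGetD fila i 0)))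
      (s, cols)
      = (s + (fila.map id).sum, addInto cols fila) := by
  intro fila
  induction fila using List.reverseRecOn with
  | nil => intro cols s; simp [PySem.List.pyRange_one_eq_nil, addInto]
  | append_singleton xs x ih =>
    intro cols s
    have hlen : ((xs ++ [x]).length : Int) = (xs.length : Int) + 1 := by
      simp
    rw [hlen, PySem.List.pyRange_one_succ_right (by positivity)]
    rw [List.foldl_append]
    have hcongr :
        (PySem.List.pyRange 0 (xs.length : Int) 1).foldl
          (fun (p : Int × List Int) i =>
            (p.1 + PySem.List.pyGetD (xs ++ [x]) i 0,
             PySem.List.pySetD p.2 i (PySem.List.pyGetD p.2 i 0 + PySem.List.pyGetD (xs ++ [x]) i 0)))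
          (s, cols)
        = (PySem.List.pyRange 0 (xs.length : Int) 1).foldl
          (fun (p : Int × List Int) i =>
            (p.1 + PySem.List.pyGetD xs i 0,
             PySem.List.pySetD p.2 i (PySem.List.pyGetD p.2 i 0 + PySem.List.pyGetD xs i 0)))
          (s, cols) := by
      apply PySem.List.foldl_congr_mem
      intro acc i hi
      rw [PySem.List.mem_pyRange_one] at hi
      obtain ⟨k, hk⟩ := Int.eq_ofNat_of_zero_le hi.1
      have hklt : k < xs.length := by omega
      simp [hk, List.getElem?_append_left hklt, List.getElem?_eq_getElem hklt]
    rw [hcongr, ih]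
    have hx : PySem.List.pyGetD (xs ++ [x]) (xs.length : Int) 0 = x := by
      simp [PySem.List.pyGetD_natCast, List.getD]
    simp only [List.foldl_cons, List.foldl_nil, PySem.List.pySetD_natCast, PySem.List.pyGetD_natCast, hx]
    rw [addInto_snoc]
    refine Prod.ext ?_ rfl
    simp
    ring

theorem foldl_addInto_length : ∀ (matriz : List (List Int)) (cols : List Int),
    (matriz.foldl addInto cols).length = cols.length := by
  intro matriz
  induction matriz with
  | nil => simp
  | cons fila rest ih => intro cols; simp [ih, length_addInto]

theorem foldl_addInto_getD : ∀ (matriz : List (List Int)) (cols : List Int) (j : Nat),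
    j < cols.length →
    (matriz.foldl addInto cols).getD j 0
      = matriz.foldl (fun acc fila => if j < fila.length then acc + fila.getD j 0 else acc)
          (cols.getD j 0) := by
  intro matriz
  induction matriz with
  | nil => simp
  | cons fila rest ih =>
    intro cols j h
    simp only [List.foldl_cons]
    rw [ih _ _ (by simpa [length_addInto] using h), addInto_getD j cols fila h]
    by_cases hf : j < fila.length <;> simp [hf]

theorem rowsum_eq (fila : List Int) : fila.foldl (fun a b => a + b) 0 = (fila.map id).sum := by
  simp [List.sum_eq_foldl]

-- ===== VERDICT (by name: the statement is the Claim_ definition above) =====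
theorem suma_filas_columnas_spec : Claim_equal_suma_filas_columnas := by
  intro matriz _ hpre
  unfold Spec_suma_filas_columnas suma_filas_columnas suma_filas_columnas_alt
  simp only []
  have hstep :
      (fun (acc : List Int × List Int) (fila : List Int) =>
        let inner := (PySem.List.pyRange 0 (fila.length : Int) 1).foldl
          (fun (p : Int × List Int) i =>
            (p.1 + PySem.List.pyGetD fila i 0,
             PySem.List.pySetD p.2 i (PySem.List.pyGetD p.2 i 0 + PySem.List.pyGetD fila i 0)))
          (0, acc.2)
        (acc.1 ++ [inner.1], inner.2))
      = (fun (acc : List Int × List Int) fila =>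
          (acc.1 ++ [fila.foldl (fun a b => a + b) 0], addInto acc.2 fila)) := by
    funext acc fila
    rw [innerA_eq, rowsum_eq]
    simp
  rw [hstep]
  rw [PySem.List.foldl_prod_mk
    (f := fun (l : List Int) (fila : List Int) => l ++ [fila.foldl (fun a b => a + b) 0])
    (g := addInto)]
  rw [PySem.List.foldl_append_singleton_eq_map]
  refine Prod.ext (by simp) ?_
  apply List.ext_getElem
  · simp [foldl_addInto_length, PySem.List.length_pyRange_one]
  · intro j h1 h2
    have hj : j < (PySem.List.pyGetD matriz 0 []).length := by
      simpa [foldl_addInto_length] using h1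
    have hL : (matriz.foldl addInto
        (List.replicate (PySem.List.pyGetD matriz 0 []).length 0))[j]
        = (matriz.foldl addInto
        (List.replicate (PySem.List.pyGetD matriz 0 []).length 0)).getD j 0 :=
      (List.getD_eq_getElem _ _ h1).symm
    rw [hL, foldl_addInto_getD _ _ _ (by simpa using hj)]
    have hR : ((PySem.List.pyRange 0 ((PySem.List.pyGetD matriz 0 []).length : Int) 1).map
        (fun j => matriz.foldl
          (fun acc fila => acc + PySem.List.pyGetD fila j 0) 0))[j]
        = matriz.foldl
          (fun acc fila => acc + PySem.List.pyGetD fila (j : Int) 0) 0 := by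
      have := PySem.List.getElem?_map_pyRange_zero
        (f := fun i => matriz.foldl
          (fun acc fila => acc + PySem.List.pyGetD fila i 0) 0)
        (n := (PySem.List.pyGetD matriz 0 []).length) (k := j) hj
      rw [List.getElem_eq_iff]
      exact this
    rw [hR]
    -- every row has the first row's length, so the guard in the left fold is always true
    have hrect : ∀ fila ∈ matriz, fila.length = (PySem.List.pyGetD matriz 0 []).length := by
      intro fila hf
      obtain ⟨hne, hall⟩ := hpre
      cases matriz with
      | nil => exact absurd rfl hne
      | cons a l =>
        simpa [PySem.List.pyGetD] using hall fila hf
    have h0 : (List.replicate (PySem.List.pyGetD matriz 0 []).length (0 : Int)).getD j 0 = 0 := by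
      simp
    rw [h0]
    apply PySem.List.foldl_congr_mem
    intro acc fila hf
    have hlenf := hrect fila hf
    have hjf : j < fila.length := by omega
    simp [hjf, PySem.List.pyGetD_natCast]
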